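-- pv_equiv track=rewrite | github.com/SebastienCoste/chess_learning | cnn/chess_v3/download_chess_data.py | extract_games_from_pgn
-- ===== SOURCE A (Python) =====
-- from typing import List, Generator
--
-- def extract_games_from_pgn(pgn_content: str) -> List[str]:
--     """Extract individual games from a PGN file content"""
--     games = []
--     current_game = ""
--
--     for line in pgn_content.split('\n'):
--         current_game += line + '\n'
--
--         # Check if this is the end of a game
--         if line.strip() in ['1-0', '0-1', '1/2-1/2', '*']:
--             if current_game.strip():
--                 games.append(current_game.strip())
--             current_game = ""
--
--     return games
-- ===== SOURCE B (Python) =====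
-- def extract_games_from_pgn(pgn_content: str) -> list:
--     """Extract individual games from a PGN file content (two-pass: find boundaries, then slice)."""
--     lines = pgn_content.split('\n')
--     ends = [i for i, line in enumerate(lines)
--             if line.strip() in ('1-0', '0-1', '1/2-1/2', '*')]
--     games = []
--     start = 0
--     for i in ends:
--         block = '\n'.join(lines[start:i + 1]).strip()
--         if block:
--             games.append(block)
--         start = i + 1
--     return games
-- ===== Notes on version B (the rewrite author's own statement) =====
-- stated objective: alternative
-- what changed: A's single pass with a growing string accumulator is replaced by a two-pass decomposition: split into lines once, collect the indices of terminator lines, then slice-and-join each block between successive boundaries.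
import Mathlib
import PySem

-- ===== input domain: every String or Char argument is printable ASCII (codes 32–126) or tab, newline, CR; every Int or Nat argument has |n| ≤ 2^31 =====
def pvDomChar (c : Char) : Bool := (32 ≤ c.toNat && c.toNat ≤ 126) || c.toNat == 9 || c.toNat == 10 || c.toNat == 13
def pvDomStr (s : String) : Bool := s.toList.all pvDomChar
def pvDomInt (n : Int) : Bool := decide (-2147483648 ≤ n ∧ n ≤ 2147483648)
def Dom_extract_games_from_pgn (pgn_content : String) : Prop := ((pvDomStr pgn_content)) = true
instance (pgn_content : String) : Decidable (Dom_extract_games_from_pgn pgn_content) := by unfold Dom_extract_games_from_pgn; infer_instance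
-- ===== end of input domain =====

-- B replaces A's single pass with a mutating string accumulator by a two-pass decomposition
-- (collect boundary-line indices, then slice-and-join each block); objective: alternative.

-- the four game-terminator markers (shared literal of both programs)
def pvTerms : List (List Char) := ["1-0", "0-1", "1/2-1/2", "*"].map String.toList

-- ===== PORT A =====
def extract_games_from_pgn (pgn_content : String) : List String :=
  let st := (PySem.Chars.splitOn pgn_content.toList ['\n']).foldl
    (fun (st : List String × List Char) line =>
      let cur := st.2 ++ line ++ ['\n']
      if PySem.Chars.strip line ∈ pvTerms then
        (if PySem.Chars.strip cur ≠ [] then st.1 ++ [String.ofList (PySem.Chars.strip cur)]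
         else st.1, [])
      else (st.1, cur))
    ([], [])
  st.1

-- ===== PORT B =====
def extract_games_from_pgn_alt (pgn_content : String) : List String :=
  let lines := PySem.Chars.splitOn pgn_content.toList ['\n']
  let ends := ((PySem.List.enumerate lines 0).filter
      (fun p => decide (PySem.Chars.strip p.2 ∈ pvTerms))).map Prod.fst
  let st := ends.foldl
    (fun (st : List String × Int) i =>
      let block := PySem.Chars.strip
        (PySem.Chars.join ['\n'] (PySem.List.slice lines (some st.2) (some (i + 1))))
      (if block ≠ [] then st.1 ++ [String.ofList block] else st.1, i + 1))
    ([], (0 : Int))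
  st.1

-- ===== PRECONDITION & SPEC =====
def Spec_extract_games_from_pgn (pgn_content : String) (out : List String) : Prop := out = extract_games_from_pgn_alt pgn_content
instance (pgn_content : String) (out : List String) : Decidable (Spec_extract_games_from_pgn pgn_content out) := by unfold Spec_extract_games_from_pgn; infer_instance

-- ===== CLAIM (what is proved, stated in full; the proofs are below) =====
def Claim_equal_extract_games_from_pgn : Prop := ∀ (pgn_content : String), Dom_extract_games_from_pgn pgn_content → Spec_extract_games_from_pgn pgn_content (extract_games_from_pgn pgn_content)

-- ===== LEMMAS AND PROOFS =====

-- chunks of lines, cut after each terminator line; trailing unterminated lines are dropped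
def pvGo : List (List Char) → List (List Char) → List (List (List Char))
  | _, [] => []
  | pend, l :: rest =>
    if PySem.Chars.strip l ∈ pvTerms then (pend ++ [l]) :: pvGo [] rest
    else pvGo (pend ++ [l]) rest

def pvEmit (c : List (List Char)) : List Char :=
  PySem.Chars.strip (PySem.Chars.join ['\n'] c)

def pvEmitList : List (List (List Char)) → List String
  | [] => []
  | c :: r => (if pvEmit c ≠ [] then [String.ofList (pvEmit c)] else []) ++ pvEmitList r

-- A's accumulator string for a list of pending lines
def pvCur : List (List Char) → List Char
  | [] => []
  | l :: r => l ++ ['\n'] ++ pvCur r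

theorem pvCur_snoc (p : List (List Char)) (l : List Char) :
    pvCur (p ++ [l]) = pvCur p ++ l ++ ['\n'] := by
  induction p with
  | nil => simp [pvCur]
  | cons x r ih => simp [pvCur, ih]

theorem pvCur_eq_join (c : List (List Char)) (h : c ≠ []) :
    pvCur c = PySem.Chars.join ['\n'] c ++ ['\n'] := by
  induction c with
  | nil => exact absurd rfl h
  | cons x r ih =>
    cases r with
    | nil => simp [pvCur, PySem.Chars.join_singleton]
    | cons y t =>
      rw [PySem.Chars.join_cons_cons]
      have h2 := ih (by simp)
      simp only [pvCur] at h2 ⊢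
      simp [h2]

theorem pvStrip_snoc_newline (x : List Char) :
    PySem.Chars.strip (x ++ ['\n']) = PySem.Chars.strip x := by
  unfold PySem.Chars.strip PySem.Chars.lstrip PySem.Chars.rstrip
  rw [List.dropWhile_append]
  by_cases h : (List.dropWhile PySem.Chars.isspace x).isEmpty
  · simp only [h, if_pos]
    simp only [List.isEmpty_iff] at h
    simp [h, List.dropWhile, PySem.Chars.isspace]
  · simp only [h, if_neg, Bool.false_eq_true, not_false_iff]
    simp [PySem.Chars.isspace]

theorem pvEmit_eq_strip_cur (c : List (List Char)) (h : c ≠ []) :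
    PySem.Chars.strip (pvCur c) = pvEmit c := by
  rw [pvCur_eq_join c h, pvStrip_snoc_newline, pvEmit]

-- step function of port A
def pvStepA (st : List String × List Char) (line : List Char) : List String × List Char :=
  let cur := st.2 ++ line ++ ['\n']
  if PySem.Chars.strip line ∈ pvTerms then
    (if PySem.Chars.strip cur ≠ [] then st.1 ++ [String.ofList (PySem.Chars.strip cur)]
     else st.1, [])
  else (st.1, cur)

-- step function of port B, closed over the full line list
def pvStepB (full : List (List Char)) (st : List String × Int) (i : Int) : List String × Int :=
  let block := PySem.Chars.strip
    (PySem.Chars.join ['\n'] (PySem.List.slice full (some st.2) (some (i + 1))))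
  (if block ≠ [] then st.1 ++ [String.ofList block] else st.1, i + 1)

theorem pvLemA (ls : List (List Char)) :
    ∀ (pend : List (List Char)) (games : List String),
      (ls.foldl pvStepA (games, pvCur pend)).1 = games ++ pvEmitList (pvGo pend ls) := by
  induction ls with
  | nil => intro pend games; simp [pvGo, pvEmitList]
  | cons l rest ih =>
    intro pend games
    rw [List.foldl_cons]
    by_cases ht : PySem.Chars.strip l ∈ pvTerms
    · have hcur : pvCur pend ++ l ++ ['\n'] = pvCur (pend ++ [l]) := (pvCur_snoc pend l).symm
      have hstep : pvStepA (games, pvCur pend) l =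
          (games ++ (if pvEmit (pend ++ [l]) ≠ [] then [String.ofList (pvEmit (pend ++ [l]))] else []),
           pvCur []) := by
        simp only [pvStepA, hcur, pvEmit_eq_strip_cur (pend ++ [l]) (by simp), if_pos ht, pvCur]
        split <;> simp
      rw [hstep, ih [] _, pvGo, if_pos ht, pvEmitList]
      simp [List.append_assoc]
    · have hstep : pvStepA (games, pvCur pend) l = (games, pvCur (pend ++ [l])) := by
        simp only [pvStepA, if_neg ht, pvCur_snoc]
      rw [hstep, ih (pend ++ [l]) games, pvGo, if_neg ht]

theorem pvLemB (ls : List (List Char)) :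
    ∀ (consumed pend : List (List Char)) (games : List String),
      ((((PySem.List.enumerate ls ((consumed.length : Int) + (pend.length : Int))).filter
          (fun p => decide (PySem.Chars.strip p.2 ∈ pvTerms))).map Prod.fst).foldl
        (pvStepB (consumed ++ (pend ++ ls))) (games, (consumed.length : Int))).1
      = games ++ pvEmitList (pvGo pend ls) := by
  induction ls with
  | nil => intro consumed pend games; simp [PySem.List.enumerate_nil, pvGo, pvEmitList]
  | cons l rest ih =>
    intro consumed pend games
    rw [PySem.List.enumerate_cons]
    by_cases ht : PySem.Chars.strip l ∈ pvTerms
    · rw [List.filter_cons_of_pos (by simpa using ht), List.map_cons, List.foldl_cons]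
      have hslice : PySem.List.slice (consumed ++ (pend ++ l :: rest))
          (some (consumed.length : Int)) (some ((consumed.length : Int) + (pend.length : Int) + 1))
          = pend ++ [l] := by
        have h1 : ((consumed.length : Int) + (pend.length : Int) + 1)
            = ((consumed.length + pend.length + 1 : Nat) : Int) := by push_cast; ring
        rw [h1, PySem.List.slice_natCast]
        rw [List.drop_left]
        have h2 : consumed.length + pend.length + 1 - consumed.length = pend.length + 1 := by omega
        rw [h2]
        rw [List.take_append]
        simp
      have hstep : pvStepB (consumed ++ (pend ++ l :: rest))
          (games, (consumed.length : Int)) ((consumed.length : Int) + (pend.length : Int))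
          = (games ++ (if pvEmit (pend ++ [l]) ≠ [] then [String.ofList (pvEmit (pend ++ [l]))] else []),
             (consumed.length : Int) + (pend.length : Int) + 1) := by
        simp only [pvStepB, hslice, pvEmit]
        split <;> simp
      rw [hstep]
      have ihx := ih (consumed ++ pend ++ [l]) []
        (games ++ if pvEmit (pend ++ [l]) ≠ [] then [String.ofList (pvEmit (pend ++ [l]))] else [])
      have hl1 : (((consumed ++ pend ++ [l]).length : Int) + (([] : List (List Char)).length : Int))
          = (consumed.length : Int) + (pend.length : Int) + 1 := by simp; ring
      have hl2 : ((consumed ++ pend ++ [l]).length : Int)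
          = (consumed.length : Int) + (pend.length : Int) + 1 := by simp; ring
      have hfull : (consumed ++ pend ++ [l]) ++ ([] ++ rest) = consumed ++ (pend ++ l :: rest) := by
        simp
      rw [hl1, hl2, hfull] at ihx
      rw [ihx, pvGo, if_pos ht, pvEmitList]
      simp [List.append_assoc]
    · rw [List.filter_cons_of_neg (by simpa using ht), pvGo, if_neg ht]
      have ihx := ih consumed (pend ++ [l]) games
      have hl1 : ((consumed.length : Int) + ((pend ++ [l]).length : Int))
          = (consumed.length : Int) + (pend.length : Int) + 1 := by simp; ring
      have hfull : consumed ++ ((pend ++ [l]) ++ rest) = consumed ++ (pend ++ l :: rest) := by simp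
      rw [hl1, hfull] at ihx
      exact ihx

-- ===== VERDICT (by name: the statement is the Claim_ definition above) =====
theorem extract_games_from_pgn_spec : Claim_equal_extract_games_from_pgn := by
  intro pgn_content _
  unfold Spec_extract_games_from_pgn
  -- both ports are definitionally the folds of pvStepA / pvStepB from empty state
  exact (pvLemA (PySem.Chars.splitOn pgn_content.toList ['\n']) [] []).trans
    (pvLemB (PySem.Chars.splitOn pgn_content.toList ['\n']) [] [] []).symm
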